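-- pv_equiv track=rewrite | github.com/NBCNeo/python-minerva | LCS for assignment 3.py | create_LCS_table
-- ===== SOURCE A (Python) =====
-- def LCS_length(X,Y):
--     m = len(X)
--     n = len(Y)
--     c = [[0 for _ in range(n+1)] for _ in range(m+1)]
--     for i in range(m):
--         for j in range(n):
--             if X[i] == Y[j]:
--                 c[i][j] = c[i-1][j-1] + 1
--             elif c[i-1][j] >= c[i][j-1]:
--                 c[i][j] = c[i-1][j]
--             else:
--                 c[i][j] = c[i][j-1]
--     return c
--
-- def create_LCS_table(strings):
--     n = len(strings)
--     strings_col = strings[:]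
--     strings_row = strings[:]
--     #initialize table
--     table = [[0 for _ in range(n)] for _ in range(n)]
--     for si in strings_col:
--         for sj in strings_row:
--             m = len(si[1])
--             n = len(sj[1])
--             table[si[0]][sj[0]] = LCS_length(si[1],sj[1])[m-1][n-1]
--     return table
-- ===== SOURCE B (Python) =====
-- def lcs_len(X, Y):
--     # top-down memoized LCS length: only cells the recursion actually needs are computed
--     memo = {}
--     def go(p, q):
--         if p < 0 or q < 0:
--             return 0
--         if (p, q) not in memo:
--             if X[p] == Y[q]:
--                 memo[(p, q)] = go(p - 1, q - 1) + 1
--             else: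
--                 memo[(p, q)] = max(go(p - 1, q), go(p, q - 1))
--         return memo[(p, q)]
--     return go(len(X) - 1, len(Y) - 1)
--
-- def create_LCS_table(strings):
--     n = len(strings)
--     table = [[0] * n for _ in range(n)]
--     for si in strings:
--         for sj in strings:
--             table[si[0]][sj[0]] = lcs_len(si[1], sj[1])
--     return table
-- ===== Notes on version B (the rewrite author's own statement) =====
-- stated objective: alternative
-- what changed: Replaces A's bottom-up (m+1)x(n+1) DP matrix with wrapping negative-index sentinel reads by a top-down memoized recursion lcs(p,q) on the two string prefixes (base 0 below either end, dict cache), keeping the same outer pairwise write loop; Pre_ excludes inputs with an embedded index outside [-n, n), on which both A and B raise IndexError.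
import Mathlib
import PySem

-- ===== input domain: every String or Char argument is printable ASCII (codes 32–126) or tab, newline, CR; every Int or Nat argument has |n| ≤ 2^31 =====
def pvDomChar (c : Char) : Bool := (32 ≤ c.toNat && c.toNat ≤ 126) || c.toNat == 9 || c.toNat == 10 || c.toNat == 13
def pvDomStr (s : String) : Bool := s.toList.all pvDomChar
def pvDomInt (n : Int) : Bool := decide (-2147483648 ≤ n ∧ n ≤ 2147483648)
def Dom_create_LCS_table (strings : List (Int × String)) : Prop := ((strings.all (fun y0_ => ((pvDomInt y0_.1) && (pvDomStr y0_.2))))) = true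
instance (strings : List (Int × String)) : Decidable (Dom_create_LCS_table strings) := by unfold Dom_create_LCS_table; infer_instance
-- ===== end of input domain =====

-- B computes each pairwise LCS length by a top-down memoized recursion on the two string
-- prefixes instead of A's bottom-up (m+1)x(n+1) matrix with wrapping negative-index reads.

-- ===== PORT A =====

-- c[i][j] read with possibly negative (wrapping) indices; every read A performs is in range,
-- so the .getD 0 default is never used.
def pvGet2 (c : List (List Int)) (i j : Int) : Int :=
  ((PySem.List.pyGet? c i).bind (fun r => PySem.List.pyGet? r j)).getD 0

def LCS_length (X Y : List Char) : List (List Int) :=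
  let m := X.length
  let n := Y.length
  (List.range m).foldl (fun c (i : Nat) =>
    (List.range n).foldl (fun c (j : Nat) =>
      let v : Int :=
        if X[i]? = Y[j]? then pvGet2 c ((i : Int) - 1) ((j : Int) - 1) + 1
        else if pvGet2 c ((i : Int) - 1) (j : Int) ≥ pvGet2 c (i : Int) ((j : Int) - 1) then
          pvGet2 c ((i : Int) - 1) (j : Int)
        else pvGet2 c (i : Int) ((j : Int) - 1)
      c.set i ((c.getD i []).set j v))
      c)
    (List.replicate (m + 1) (List.replicate (n + 1) (0 : Int)))

-- Python list-index resolution for a write (negative index counts from the end);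
-- exact for in-range indices, which Pre_ guarantees.
def pvResolve (n : Nat) (i : Int) : Nat := (if i < 0 then i + n else i).toNat

def create_LCS_table (strings : List (Int × String)) : List (List Int) :=
  let n := strings.length
  strings.foldl (fun table si =>
    strings.foldl (fun table sj =>
      let m := si.2.toList.length
      let k := sj.2.toList.length
      let v := pvGet2 (LCS_length si.2.toList sj.2.toList) ((m : Int) - 1) ((k : Int) - 1)
      let a := pvResolve n si.1
      let b := pvResolve n sj.1
      table.set a ((table.getD a []).set b v))
      table)
    (List.replicate n (List.replicate n (0 : Int)))

-- ===== PORT B =====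

-- go(p, q) of Source B: memo threaded through; the X[p] == Y[q] comparison is only reached with
-- 0 ≤ p < len X and 0 ≤ q < len Y, where pyGet? is some, so Option equality is exact.
def lcsGo (X Y : List Char) (p q : Int) (memo : PySem.Dict (Int × Int) Int) :
    Int × PySem.Dict (Int × Int) Int :=
  if p < 0 ∨ q < 0 then (0, memo)
  else
    match memo.get? (p, q) with
    | some v => (v, memo)
    | none =>
      if PySem.List.pyGet? X p = PySem.List.pyGet? Y q then
        let r := lcsGo X Y (p - 1) (q - 1) memo
        (r.1 + 1, r.2.insert (p, q) (r.1 + 1))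
      else
        let r1 := lcsGo X Y (p - 1) q memo
        let r2 := lcsGo X Y p (q - 1) r1.2
        (max r1.1 r2.1, r2.2.insert (p, q) (max r1.1 r2.1))
termination_by (p + q + 2).toNat
decreasing_by all_goals (rename_i h _; rw [not_or] at h; omega)

def lcs_len (X Y : List Char) : Int :=
  (lcsGo X Y ((X.length : Int) - 1) ((Y.length : Int) - 1) PySem.Dict.empty).1

def create_LCS_table_alt (strings : List (Int × String)) : List (List Int) :=
  let n := strings.length
  strings.foldl (fun table si =>
    strings.foldl (fun table sj =>
      let v := lcs_len si.2.toList sj.2.toList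
      let a := pvResolve n si.1
      let b := pvResolve n sj.1
      table.set a ((table.getD a []).set b v))
      table)
    (List.replicate n (List.replicate n (0 : Int)))

-- ===== PRECONDITION & SPEC =====

-- Pre_ excludes exactly the inputs on which both Pythons raise IndexError: an embedded index
-- outside [-len(strings), len(strings)).
def Pre_create_LCS_table (strings : List (Int × String)) : Prop :=
  ∀ p ∈ strings, PySem.Raise.InRange strings.length p.1
instance (strings : List (Int × String)) : Decidable (Pre_create_LCS_table strings) := by
  unfold Pre_create_LCS_table; infer_instance

def pvWitness_create_LCS_table : (List (Int × String)) := [(0, "ab"), (-1, "bca")]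

def Spec_create_LCS_table (strings : List (Int × String)) (out : List (List Int)) : Prop := out = create_LCS_table_alt strings
instance (strings : List (Int × String)) (out : List (List Int)) : Decidable (Spec_create_LCS_table strings out) := by unfold Spec_create_LCS_table; infer_instance

-- ===== CLAIM (what is proved, stated in full; the proofs are below) =====
def Claim_equal_create_LCS_table : Prop := ∀ (strings : List (Int × String)), Dom_create_LCS_table strings → Pre_create_LCS_table strings → Spec_create_LCS_table strings (create_LCS_table strings)

-- ===== LEMMAS AND PROOFS =====

-- Reference LCS-of-prefixes value: pvL X Y i j = LCS length of X[:i] and Y[:j].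
def pvL (X Y : List Char) : Nat → Nat → Int
  | 0, _ => 0
  | _ + 1, 0 => 0
  | i + 1, j + 1 =>
    if X[i]? = Y[j]? then pvL X Y i j + 1
    else max (pvL X Y i (j + 1)) (pvL X Y (i + 1) j)

theorem pvL_zero_left (X Y : List Char) (j : Nat) : pvL X Y 0 j = 0 := by
  simp [pvL]

theorem pvL_zero_right (X Y : List Char) (i : Nat) : pvL X Y i 0 = 0 := by
  cases i <;> simp [pvL]

theorem pvL_succ (X Y : List Char) (i j : Nat) :
    pvL X Y (i + 1) (j + 1) =
      if X[i]? = Y[j]? then pvL X Y i j + 1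
      else max (pvL X Y i (j + 1)) (pvL X Y (i + 1) j) := by
  simp [pvL]

-- ---- generic lemmas about tables in "map over range" normal form ----

theorem pyGet?_map_range {α : Type} (f : Nat → α) (M : Nat) (i : Int)
    (h1 : -(M : Int) ≤ i) (h2 : i < M) :
    PySem.List.pyGet? ((List.range M).map f) i = some (f (pvResolve M i)) := by
  by_cases h0 : 0 ≤ i
  · have hlt : i.toNat < M := by omega
    have hres : pvResolve M i = i.toNat := by
      unfold pvResolve; rw [if_neg (by omega)]
    rw [hres]
    conv_lhs => rw [show i = ((i.toNat : Nat) : Int) by omega]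
    rw [PySem.List.pyGet?_natCast, List.getElem?_map, List.getElem?_range hlt]
    rfl
  · have h : i < 0 := by omega
    have hk1 : 0 < (-i).toNat := by omega
    have hk2 : (-i).toNat ≤ ((List.range M).map f).length := by
      simp; omega
    have hres : pvResolve M i = M - (-i).toNat := by
      unfold pvResolve; rw [if_pos h]; omega
    rw [hres]
    conv_lhs => rw [show i = -(((-i).toNat : Nat) : Int) by omega]
    rw [PySem.List.pyGet?_neg_natCast ((List.range M).map f) (-i).toNat hk1 hk2]
    rw [show ((List.range M).map f).length = M from by simp]
    rw [List.getElem?_map, List.getElem?_range (by omega : M - (-i).toNat < M)]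
    rfl

theorem pvGet2_mm (g : Nat → Nat → Int) (M N : Nat) (i j : Int)
    (hi1 : -(M : Int) ≤ i) (hi2 : i < M) (hj1 : -(N : Int) ≤ j) (hj2 : j < N) :
    pvGet2 ((List.range M).map (fun r => (List.range N).map (g r))) i j
      = g (pvResolve M i) (pvResolve N j) := by
  unfold pvGet2
  rw [pyGet?_map_range _ M i hi1 hi2]
  simp only [Option.bind_some]
  rw [pyGet?_map_range _ N j hj1 hj2]
  rfl

theorem mm_congr (g g' : Nat → Nat → Int) (M N : Nat)
    (h : ∀ r, r < M → ∀ t, t < N → g r t = g' r t) :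
    (List.range M).map (fun r => (List.range N).map (g r))
      = (List.range M).map (fun r => (List.range N).map (g' r)) := by
  apply List.map_congr_left
  intro r hr
  rw [List.mem_range] at hr
  apply List.map_congr_left
  intro t ht
  rw [List.mem_range] at ht
  exact h r hr t ht

theorem getD_mm {M N : Nat} (g : Nat → Nat → Int) (a : Nat) (ha : a < M) :
    ((List.range M).map (fun r => (List.range N).map (g r))).getD a []
      = (List.range N).map (g a) := by
  simp [List.getD_eq_getElem?_getD, List.getElem?_map, List.getElem?_range ha]

theorem set_mm {M N : Nat} (g : Nat → Nat → Int) (a b : Nat) (ha : a < M) (_hb : b < N) (v : Int) :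
    ((List.range M).map (fun r => (List.range N).map (g r))).set a
        ((((List.range M).map (fun r => (List.range N).map (g r))).getD a []).set b v)
      = (List.range M).map (fun r => (List.range N).map (fun t =>
          if r = a ∧ t = b then v else g r t)) := by
  rw [getD_mm g a ha]
  apply List.ext_getElem
  · simp
  · intro r h1 h2
    have hr : r < M := by simpa using h2
    simp only [List.getElem_set, List.getElem_map, List.getElem_range]
    by_cases hra : a = r
    · subst hra
      rw [if_pos rfl]
      apply List.ext_getElem
      · simp
      · intro t g1 g2
        have ht : t < N := by simpa using g2
        simp only [List.getElem_set, List.getElem_map, List.getElem_range]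
        by_cases htb : b = t
        · subst htb
          rw [if_pos rfl, if_pos ⟨trivial, rfl⟩]
        · rw [if_neg htb, if_neg (fun hx => htb hx.2.symm)]
    · rw [if_neg hra]
      apply List.map_congr_left
      intro t htm
      rw [List.mem_range] at htm
      rw [if_neg (by omega)]

-- ---- A helper: the DP matrix of LCS_length ----

def pvC (X Y : List Char) (i0 j0 : Nat) : List (List Int) :=
  (List.range (X.length + 1)).map (fun r =>
    (List.range (Y.length + 1)).map (fun t =>
      if (r < i0 ∧ t < Y.length) ∨ (r = i0 ∧ t < j0) then pvL X Y (r + 1) (t + 1) else 0))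

theorem pvC_zero (X Y : List Char) :
    pvC X Y 0 0 = List.replicate (X.length + 1) (List.replicate (Y.length + 1) (0 : Int)) := by
  unfold pvC
  calc (List.range (X.length + 1)).map (fun r =>
        (List.range (Y.length + 1)).map (fun t =>
          if (r < 0 ∧ t < Y.length) ∨ (r = 0 ∧ t < 0) then pvL X Y (r + 1) (t + 1) else 0))
      = (List.range (X.length + 1)).map (fun _ =>
          (List.range (Y.length + 1)).map (fun _ => (0 : Int))) := by
        apply mm_congr
        intro r _ t _
        rw [if_neg (by omega)]
    _ = List.replicate (X.length + 1) (List.replicate (Y.length + 1) (0 : Int)) := by simp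

def pvStepA (X Y : List Char) (c : List (List Int)) (i j : Nat) : List (List Int) :=
  let v : Int :=
    if X[i]? = Y[j]? then pvGet2 c ((i : Int) - 1) ((j : Int) - 1) + 1
    else if pvGet2 c ((i : Int) - 1) (j : Int) ≥ pvGet2 c (i : Int) ((j : Int) - 1) then
      pvGet2 c ((i : Int) - 1) (j : Int)
    else pvGet2 c (i : Int) ((j : Int) - 1)
  c.set i ((c.getD i []).set j v)

theorem LCS_shape (X Y : List Char) :
    LCS_length X Y = (List.range X.length).foldl (fun c (i : Nat) =>
      (List.range Y.length).foldl (fun c (j : Nat) => pvStepA X Y c i j) c)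
      (List.replicate (X.length + 1) (List.replicate (Y.length + 1) (0 : Int))) := rfl

theorem pvC_read (X Y : List Char) (i0 j0 : Nat) (i j : Int)
    (hi1 : -((X.length : Int) + 1) ≤ i) (hi2 : i < (X.length : Int) + 1)
    (hj1 : -((Y.length : Int) + 1) ≤ j) (hj2 : j < (Y.length : Int) + 1) :
    pvGet2 (pvC X Y i0 j0) i j =
      if (pvResolve (X.length + 1) i < i0 ∧ pvResolve (Y.length + 1) j < Y.length)
          ∨ (pvResolve (X.length + 1) i = i0 ∧ pvResolve (Y.length + 1) j < j0)
      then pvL X Y (pvResolve (X.length + 1) i + 1) (pvResolve (Y.length + 1) j + 1)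
      else 0 := by
  unfold pvC
  rw [pvGet2_mm _ (X.length + 1) (Y.length + 1) i j (by push_cast; omega) (by push_cast; omega)
    (by push_cast; omega) (by push_cast; omega)]

theorem stepA_eq (X Y : List Char) (i j : Nat) (hi : i < X.length) (hj : j < Y.length) :
    pvStepA X Y (pvC X Y i j) i j = pvC X Y i (j + 1) := by
  have h1 : pvGet2 (pvC X Y i j) ((i : Int) - 1) ((j : Int) - 1) = pvL X Y i j := by
    rw [pvC_read X Y i j _ _ (by omega) (by omega) (by omega) (by omega)]
    rcases Nat.eq_zero_or_pos i with hi0 | hi0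
    · have e : pvResolve (X.length + 1) ((i : Int) - 1) = X.length := by
        unfold pvResolve; rw [if_pos (by omega)]; omega
      rw [e, if_neg (by omega), hi0, pvL_zero_left]
    · have e : pvResolve (X.length + 1) ((i : Int) - 1) = i - 1 := by
        unfold pvResolve; rw [if_neg (by omega)]; omega
      rw [e]
      rcases Nat.eq_zero_or_pos j with hj0 | hj0
      · have e2 : pvResolve (Y.length + 1) ((j : Int) - 1) = Y.length := by
          unfold pvResolve; rw [if_pos (by omega)]; omega
        rw [e2, if_neg (by omega), hj0, pvL_zero_right]
      · have e2 : pvResolve (Y.length + 1) ((j : Int) - 1) = j - 1 := by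
          unfold pvResolve; rw [if_neg (by omega)]; omega
        rw [e2, if_pos (Or.inl ⟨by omega, by omega⟩)]
        rw [show i - 1 + 1 = i by omega, show j - 1 + 1 = j by omega]
  have h2 : pvGet2 (pvC X Y i j) ((i : Int) - 1) (j : Int) = pvL X Y i (j + 1) := by
    rw [pvC_read X Y i j _ _ (by omega) (by omega) (by omega) (by omega)]
    have ej : pvResolve (Y.length + 1) (j : Int) = j := by
      unfold pvResolve; rw [if_neg (by omega)]; omega
    rcases Nat.eq_zero_or_pos i with hi0 | hi0
    · have e : pvResolve (X.length + 1) ((i : Int) - 1) = X.length := by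
        unfold pvResolve; rw [if_pos (by omega)]; omega
      rw [e, ej, if_neg (by omega), hi0, pvL_zero_left]
    · have e : pvResolve (X.length + 1) ((i : Int) - 1) = i - 1 := by
        unfold pvResolve; rw [if_neg (by omega)]; omega
      rw [e, ej, if_pos (Or.inl ⟨by omega, by omega⟩)]
      rw [show i - 1 + 1 = i by omega]
  have h3 : pvGet2 (pvC X Y i j) (i : Int) ((j : Int) - 1) = pvL X Y (i + 1) j := by
    rw [pvC_read X Y i j _ _ (by omega) (by omega) (by omega) (by omega)]
    have ei : pvResolve (X.length + 1) (i : Int) = i := by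
      unfold pvResolve; rw [if_neg (by omega)]; omega
    rcases Nat.eq_zero_or_pos j with hj0 | hj0
    · have e2 : pvResolve (Y.length + 1) ((j : Int) - 1) = Y.length := by
        unfold pvResolve; rw [if_pos (by omega)]; omega
      rw [ei, e2, if_neg (by omega), hj0, pvL_zero_right]
    · have e2 : pvResolve (Y.length + 1) ((j : Int) - 1) = j - 1 := by
        unfold pvResolve; rw [if_neg (by omega)]; omega
      rw [ei, e2, if_pos (Or.inr ⟨rfl, by omega⟩)]
      rw [show j - 1 + 1 = j by omega]
  show (pvC X Y i j).set i (((pvC X Y i j).getD i []).set j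
      (if X[i]? = Y[j]? then pvGet2 (pvC X Y i j) ((i : Int) - 1) ((j : Int) - 1) + 1
       else if pvGet2 (pvC X Y i j) ((i : Int) - 1) (j : Int)
            ≥ pvGet2 (pvC X Y i j) (i : Int) ((j : Int) - 1) then
         pvGet2 (pvC X Y i j) ((i : Int) - 1) (j : Int)
       else pvGet2 (pvC X Y i j) (i : Int) ((j : Int) - 1))) = pvC X Y i (j + 1)
  rw [h1, h2, h3]
  have hv : (if X[i]? = Y[j]? then pvL X Y i j + 1
      else if pvL X Y i (j + 1) ≥ pvL X Y (i + 1) j then pvL X Y i (j + 1)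
      else pvL X Y (i + 1) j) = pvL X Y (i + 1) (j + 1) := by
    rw [pvL_succ]
    by_cases hc : X[i]? = Y[j]?
    · rw [if_pos hc, if_pos hc]
    · rw [if_neg hc, if_neg hc]
      rcases le_total (pvL X Y (i + 1) j) (pvL X Y i (j + 1)) with hle | hle
      · rw [if_pos hle, max_eq_left hle]
      · rcases lt_or_eq_of_le hle with hlt | heq
        · rw [if_neg (by omega), max_eq_right hle]
        · rw [heq]; simp
  rw [hv]
  unfold pvC
  rw [set_mm _ i j (by omega) (by omega)]
  apply mm_congr
  intro r hr t ht
  by_cases hcell : r = i ∧ t = j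
  · rw [if_pos hcell, if_pos (Or.inr ⟨hcell.1, by omega⟩)]
    rw [hcell.1, hcell.2]
  · rw [if_neg hcell]
    by_cases hold : (r < i ∧ t < Y.length) ∨ (r = i ∧ t < j)
    · rw [if_pos hold, if_pos (by omega)]
    · rw [if_neg hold, if_neg (by omega)]

theorem foldA_inner (X Y : List Char) (i : Nat) (hi : i < X.length) :
    ∀ j, j ≤ Y.length →
      (List.range j).foldl (fun c (jj : Nat) => pvStepA X Y c i jj) (pvC X Y i 0)
        = pvC X Y i j := by
  intro j
  induction j with
  | zero => intro _; simp
  | succ j ih =>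
    intro hj
    rw [List.range_succ, List.foldl_append, ih (by omega)]
    simp only [List.foldl_cons, List.foldl_nil]
    exact stepA_eq X Y i j hi (by omega)

theorem pvC_roll (X Y : List Char) (i : Nat) :
    pvC X Y i Y.length = pvC X Y (i + 1) 0 := by
  unfold pvC
  apply mm_congr
  intro r hr t ht
  by_cases hc : (r < i ∧ t < Y.length) ∨ (r = i ∧ t < Y.length)
  · rw [if_pos hc, if_pos (by omega)]
  · rw [if_neg hc, if_neg (by omega)]

theorem foldA_outer (X Y : List Char) :
    ∀ k, k ≤ X.length →
      (List.range k).foldl (fun c (i : Nat) =>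
        (List.range Y.length).foldl (fun c (j : Nat) => pvStepA X Y c i j) c)
        (pvC X Y 0 0)
      = pvC X Y k 0 := by
  intro k
  induction k with
  | zero => intro _; simp
  | succ k ih =>
    intro hk
    rw [List.range_succ, List.foldl_append, ih (by omega)]
    simp only [List.foldl_cons, List.foldl_nil]
    rw [foldA_inner X Y k (by omega) Y.length le_rfl, pvC_roll]

theorem LCS_length_eq (X Y : List Char) :
    pvGet2 (LCS_length X Y) ((X.length : Int) - 1) ((Y.length : Int) - 1)
      = pvL X Y X.length Y.length := by
  rw [LCS_shape, ← pvC_zero, foldA_outer X Y X.length le_rfl]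
  rw [pvC_read X Y X.length 0 _ _ (by omega) (by omega) (by omega) (by omega)]
  rcases Nat.eq_zero_or_pos X.length with hm | hm
  · have e1 : pvResolve (X.length + 1) ((X.length : Int) - 1) = X.length := by
      unfold pvResolve; rw [if_pos (by omega)]; omega
    rw [e1, if_neg (by omega), hm, pvL_zero_left]
  · have e1 : pvResolve (X.length + 1) ((X.length : Int) - 1) = X.length - 1 := by
      unfold pvResolve; rw [if_neg (by omega)]; omega
    rcases Nat.eq_zero_or_pos Y.length with hn | hn
    · have e2 : pvResolve (Y.length + 1) ((Y.length : Int) - 1) = Y.length := by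
        unfold pvResolve; rw [if_pos (by omega)]; omega
      rw [e1, e2, if_neg (by omega), hn, pvL_zero_right]
    · have e2 : pvResolve (Y.length + 1) ((Y.length : Int) - 1) = Y.length - 1 := by
        unfold pvResolve; rw [if_neg (by omega)]; omega
      rw [e1, e2, if_pos (Or.inl ⟨by omega, by omega⟩)]
      rw [show X.length - 1 + 1 = X.length by omega, show Y.length - 1 + 1 = Y.length by omega]

-- ---- B side: the memoized recursion computes pvL ----

-- what any memo entry (p, q) must hold: the LCS length of X[:p+1] and Y[:q+1]
def pvSpecI (X Y : List Char) (p q : Int) : Int :=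
  if p < 0 ∨ q < 0 then 0 else pvL X Y (p.toNat + 1) (q.toNat + 1)

def pvInv (X Y : List Char) (memo : PySem.Dict (Int × Int) Int) : Prop :=
  ∀ k v, memo.get? k = some v → v = pvSpecI X Y k.1 k.2

theorem pvSpecI_shift (X Y : List Char) (p q : Int) (hp : 0 ≤ p) (hq : 0 ≤ q) :
    pvSpecI X Y (p - 1) (q - 1) = pvL X Y p.toNat q.toNat := by
  unfold pvSpecI
  by_cases hp0 : p - 1 < 0
  · rw [if_pos (Or.inl hp0), show p.toNat = 0 by omega, pvL_zero_left]
  · by_cases hq0 : q - 1 < 0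
    · rw [if_pos (Or.inr hq0), show q.toNat = 0 by omega, pvL_zero_right]
    · rw [if_neg (by omega), show (p - 1).toNat + 1 = p.toNat by omega,
        show (q - 1).toNat + 1 = q.toNat by omega]

theorem pvSpecI_shift_left (X Y : List Char) (p q : Int) (hp : 0 ≤ p) (hq : 0 ≤ q) :
    pvSpecI X Y (p - 1) q = pvL X Y p.toNat (q.toNat + 1) := by
  unfold pvSpecI
  by_cases hp0 : p - 1 < 0
  · rw [if_pos (Or.inl hp0), show p.toNat = 0 by omega, pvL_zero_left]
  · rw [if_neg (by omega), show (p - 1).toNat + 1 = p.toNat by omega]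

theorem pvSpecI_shift_right (X Y : List Char) (p q : Int) (hp : 0 ≤ p) (hq : 0 ≤ q) :
    pvSpecI X Y p (q - 1) = pvL X Y (p.toNat + 1) q.toNat := by
  unfold pvSpecI
  by_cases hq0 : q - 1 < 0
  · rw [if_pos (Or.inr hq0), show q.toNat = 0 by omega, pvL_zero_right]
  · rw [if_neg (by omega), show (q - 1).toNat + 1 = q.toNat by omega]

theorem pvPyGet_nonneg (X : List Char) (p : Int) (hp0 : 0 ≤ p) :
    PySem.List.pyGet? X p = X[p.toNat]? := by
  conv_lhs => rw [show p = ((p.toNat : Nat) : Int) by omega]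
  rw [PySem.List.pyGet?_natCast]

theorem pvSpecI_step_eq (X Y : List Char) (p q : Int) (hp0 : 0 ≤ p) (hq0 : 0 ≤ q)
    (hcc : X[p.toNat]? = Y[q.toNat]?) :
    pvSpecI X Y p q = pvSpecI X Y (p - 1) (q - 1) + 1 := by
  rw [pvSpecI_shift X Y p q hp0 hq0]
  unfold pvSpecI
  rw [if_neg (by omega), pvL_succ, if_pos hcc]

theorem pvSpecI_step_ne (X Y : List Char) (p q : Int) (hp0 : 0 ≤ p) (hq0 : 0 ≤ q)
    (hcc : ¬ X[p.toNat]? = Y[q.toNat]?) :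
    pvSpecI X Y p q = max (pvSpecI X Y (p - 1) q) (pvSpecI X Y p (q - 1)) := by
  rw [pvSpecI_shift_left X Y p q hp0 hq0, pvSpecI_shift_right X Y p q hp0 hq0]
  unfold pvSpecI
  rw [if_neg (by omega), pvL_succ, if_neg hcc]

theorem lcsGo_correct (X Y : List Char) :
    ∀ (N : Nat) (p q : Int) (memo : PySem.Dict (Int × Int) Int),
      (p + q + 2).toNat ≤ N → p < X.length → q < Y.length → pvInv X Y memo →
      (lcsGo X Y p q memo).1 = pvSpecI X Y p q ∧ pvInv X Y (lcsGo X Y p q memo).2 := by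
  intro N
  induction N with
  | zero =>
    intro p q memo hN hp hq hinv
    rw [lcsGo]
    rw [if_pos (by omega)]
    refine ⟨?_, hinv⟩
    unfold pvSpecI
    rw [if_pos (by omega)]
  | succ N ih =>
    intro p q memo hN hp hq hinv
    rw [lcsGo]
    by_cases hbase : p < 0 ∨ q < 0
    · rw [if_pos hbase]
      exact ⟨by unfold pvSpecI; rw [if_pos hbase], hinv⟩
    · rw [if_neg hbase]
      have hp0 : 0 ≤ p := by omega
      have hq0 : 0 ≤ q := by omega
      cases hm : memo.get? (p, q) with
      | some v =>
        simp only
        exact ⟨hinv (p, q) v hm, hinv⟩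
      | none =>
        simp only
        by_cases hc : PySem.List.pyGet? X p = PySem.List.pyGet? Y q
        · rw [if_pos hc]
          have hcc : X[p.toNat]? = Y[q.toNat]? := by
            rw [← pvPyGet_nonneg X p hp0, ← pvPyGet_nonneg Y q hq0, hc]
          obtain ⟨hv, hinv'⟩ := ih (p - 1) (q - 1) memo (by omega) (by omega) (by omega) hinv
          have hval : (lcsGo X Y (p - 1) (q - 1) memo).1 + 1 = pvSpecI X Y p q := by
            rw [hv, pvSpecI_step_eq X Y p q hp0 hq0 hcc]
          refine ⟨hval, ?_⟩
          intro k v hk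
          rw [PySem.Dict.get?_insert] at hk
          by_cases hkey : k = (p, q)
          · rw [if_pos hkey] at hk
            rw [← Option.some.inj hk, hkey]
            exact hval
          · rw [if_neg hkey] at hk
            exact hinv' k v hk
        · rw [if_neg hc]
          have hcc : ¬ X[p.toNat]? = Y[q.toNat]? := by
            intro hx
            exact hc (by rw [pvPyGet_nonneg X p hp0, pvPyGet_nonneg Y q hq0, hx])
          obtain ⟨hv1, hinv1⟩ := ih (p - 1) q memo (by omega) (by omega) hq hinv
          obtain ⟨hv2, hinv2⟩ := ih p (q - 1) (lcsGo X Y (p - 1) q memo).2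
            (by omega) hp (by omega) hinv1
          have hval : max (lcsGo X Y (p - 1) q memo).1
              (lcsGo X Y p (q - 1) (lcsGo X Y (p - 1) q memo).2).1 = pvSpecI X Y p q := by
            rw [hv1, hv2, pvSpecI_step_ne X Y p q hp0 hq0 hcc]
          refine ⟨hval, ?_⟩
          intro k v hk
          rw [PySem.Dict.get?_insert] at hk
          by_cases hkey : k = (p, q)
          · rw [if_pos hkey] at hk
            rw [← Option.some.inj hk, hkey]
            exact hval
          · rw [if_neg hkey] at hk
            exact hinv2 k v hk

theorem lcs_len_eq (X Y : List Char) : lcs_len X Y = pvL X Y X.length Y.length := by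
  unfold lcs_len
  have hinv : pvInv X Y PySem.Dict.empty := by
    intro k v hk
    rw [PySem.Dict.get?_empty] at hk
    exact absurd hk (by simp)
  obtain ⟨hv, _⟩ := lcsGo_correct X Y ((X.length : Int) + (Y.length : Int) + 2).toNat
    ((X.length : Int) - 1) ((Y.length : Int) - 1) PySem.Dict.empty
    (by omega) (by omega) (by omega) hinv
  rw [hv]
  unfold pvSpecI
  by_cases hm : X.length = 0
  · rw [if_pos (Or.inl (by omega)), hm, pvL_zero_left]
  · by_cases hn : Y.length = 0
    · rw [if_pos (Or.inr (by omega)), hn, pvL_zero_right]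
    · rw [if_neg (by omega), show ((X.length : Int) - 1).toNat + 1 = X.length by omega,
        show ((Y.length : Int) - 1).toNat + 1 = Y.length by omega]

-- the two per-pair values agree, hence the two identical write loops produce the same table
theorem pair_value_eq (sa sb : String) :
    pvGet2 (LCS_length sa.toList sb.toList)
        ((sa.toList.length : Int) - 1) ((sb.toList.length : Int) - 1)
      = lcs_len sa.toList sb.toList := by
  rw [LCS_length_eq, lcs_len_eq]

-- ===== VERDICT (by name: the statement is the Claim_ definition above) =====
theorem create_LCS_table_spec : Claim_equal_create_LCS_table := by
  intro strings _ _
  unfold Spec_create_LCS_table create_LCS_table create_LCS_table_alt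
  simp only
  congr 1
  funext table si
  congr 1
  funext table sj
  rw [pair_value_eq]
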